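-- pv_equiv track=rewrite | github.com/charliedmiller/coding_challenges | k-diff_pairs_in_an_array.py | num_duplicates
-- ===== SOURCE A (Python) =====
-- def num_duplicates(nums):
--
--     pairs = 0
--     seen = set()
--     paired = set()
--
--     for num in nums:
--         #only add pairs if we've seen it before
--         if num not in seen:
--             seen.add(num)
--         else:
--             #to prevent counting triplicates or more, add to another set
--             #to check before adding to pairs
--             if num not in paired:
--                 pairs += 1
--                 paired.add(num)
--
--     return pairs
-- ===== SOURCE B (Python) =====
-- def num_duplicates(nums):
--     counts = {}
--     for n in nums:
--         counts[n] = counts.get(n, 0) + 1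
--     return sum(1 for v in counts.values() if v >= 2)
-- ===== Notes on version B (the rewrite author's own statement) =====
-- stated objective: simpler
-- what changed: Replaces A's single incremental pass with two transition-detecting membership sets by a two-phase build-then-filter: tally a full frequency table, then count values >= 2.
import Mathlib
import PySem

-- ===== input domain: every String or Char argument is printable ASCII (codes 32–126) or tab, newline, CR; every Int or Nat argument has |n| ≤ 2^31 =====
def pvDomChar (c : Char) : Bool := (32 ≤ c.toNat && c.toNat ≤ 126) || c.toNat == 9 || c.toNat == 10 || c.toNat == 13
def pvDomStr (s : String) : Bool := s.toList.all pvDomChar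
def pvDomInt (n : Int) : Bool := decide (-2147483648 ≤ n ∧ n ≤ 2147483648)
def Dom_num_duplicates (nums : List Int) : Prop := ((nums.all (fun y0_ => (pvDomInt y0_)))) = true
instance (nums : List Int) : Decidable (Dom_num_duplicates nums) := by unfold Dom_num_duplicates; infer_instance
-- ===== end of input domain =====

-- B replaces A's single transition-detecting pass with two membership sets by a two-phase build-then-filter: tally a frequency table, then count values ≥ 2 (objective: simpler).

-- ===== PORT A =====
def num_duplicates_step (st : Int × PySem.Set Int × PySem.Set Int) (num : Int) :
    Int × PySem.Set Int × PySem.Set Int :=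
  if ¬ (PySem.Set.contains st.2.1 num) then (st.1, PySem.Set.add st.2.1 num, st.2.2)
  else if ¬ (PySem.Set.contains st.2.2 num) then (st.1 + 1, st.2.1, PySem.Set.add st.2.2 num)
  else st

def num_duplicates (nums : List Int) : Int :=
  (nums.foldl num_duplicates_step
    ((0 : Int), (PySem.Set.empty : PySem.Set Int), (PySem.Set.empty : PySem.Set Int))).1

-- ===== PORT B =====
def num_duplicates_alt (nums : List Int) : Int :=
  let counts := nums.foldl (fun d n => d.insert n (d.getD n 0 + 1))
    (PySem.Dict.empty : PySem.Dict Int Int)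
  (counts.values.map (fun v => if 2 ≤ v then (1 : Int) else 0)).sum

-- ===== PRECONDITION & SPEC =====
def Spec_num_duplicates (nums : List Int) (out : Int) : Prop := out = num_duplicates_alt nums
instance (nums : List Int) (out : Int) : Decidable (Spec_num_duplicates nums out) := by unfold Spec_num_duplicates; infer_instance

-- ===== CLAIM (what is proved, stated in full; the proofs are below) =====
def Claim_equal_num_duplicates : Prop := ∀ (nums : List Int), Dom_num_duplicates nums → Spec_num_duplicates nums (num_duplicates nums)

-- ===== LEMMAS AND PROOFS =====

-- Invariant for A's loop: the pairs counter advances exactly with the paired set,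
-- and the final paired set's membership is characterised by occurrence counts.
theorem loopA_spec (l : List Int) (p : Int) (seen paired : PySem.Set Int)
    (hnd : paired.Nodup) :
    (l.foldl num_duplicates_step (p, seen, paired)).1
        = p + ((l.foldl num_duplicates_step (p, seen, paired)).2.2.length - paired.length : Int)
    ∧ (∀ x, x ∈ (l.foldl num_duplicates_step (p, seen, paired)).2.2 ↔
        x ∈ paired ∨ (x ∈ seen ∧ x ∈ l) ∨ (x ∉ seen ∧ 2 ≤ l.count x))
    ∧ (l.foldl num_duplicates_step (p, seen, paired)).2.2.Nodup := by
  induction l generalizing p seen paired with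
  | nil =>
    refine ⟨by simp, fun x => by simp, hnd⟩
  | cons num t ih =>
    by_cases hs : num ∈ seen
    · by_cases hpd : num ∈ paired
      · have hstep : num_duplicates_step (p, seen, paired) num = (p, seen, paired) := by
          simp [num_duplicates_step, hs, hpd]
        obtain ⟨h1, h2, h3⟩ := ih p seen paired hnd
        refine ⟨?_, ?_, ?_⟩ <;> simp only [List.foldl_cons, hstep]
        · exact h1
        · intro x
          rw [h2 x]
          by_cases hx : x = num
          · subst hx; simp [hpd]
          · simp [List.mem_cons, hx, Ne.symm hx]
        · exact h3
      · have hstep : num_duplicates_step (p, seen, paired) num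
            = (p + 1, seen, paired ++ [num]) := by
          simp [num_duplicates_step, hs, hpd]
        have hnd' : (paired ++ [num]).Nodup := by
          simp [List.nodup_append, hnd]
          exact fun a ha h => hpd (h ▸ ha)
        obtain ⟨h1, h2, h3⟩ := ih (p + 1) seen (paired ++ [num]) hnd'
        refine ⟨?_, ?_, ?_⟩ <;> simp only [List.foldl_cons, hstep]
        · rw [h1]; simp; omega
        · intro x
          rw [h2 x]
          by_cases hx : x = num
          · subst hx; simp [hs]
          · simp [List.mem_append, hx, Ne.symm hx, List.mem_cons]
        · exact h3
    · have hstep : num_duplicates_step (p, seen, paired) num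
          = (p, PySem.Set.add seen num, paired) := by
        simp [num_duplicates_step, hs]
      obtain ⟨h1, h2, h3⟩ := ih p (PySem.Set.add seen num) paired hnd
      refine ⟨?_, ?_, ?_⟩ <;> simp only [List.foldl_cons, hstep]
      · exact h1
      · intro x
        rw [h2 x]
        by_cases hx : x = num
        · subst hx; simp [hs]
        · simp [PySem.Set.mem_add, hx, Ne.symm hx, List.mem_cons]
      · exact h3

-- B's value is the number of distinct elements occurring at least twice.
theorem altB_eq_countP (nums : List Int) :
    num_duplicates_alt nums
      = ((PySem.Set.ofList nums).countP (fun k => decide (2 ≤ nums.count k)) : Int) := by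
  unfold num_duplicates_alt
  simp only [PySem.Dict.foldl_insert_getD_add_one_eq_counter]
  have hvals : (PySem.Dict.counter nums).values
      = (PySem.Set.ofList nums).map (fun k => ((nums.count k : Int))) := by
    have := PySem.Dict.items_counter (κ := Int) nums
    simp only [PySem.Dict.values, this, List.map_map]
    rfl
  rw [hvals, List.map_map]
  have := PySem.List.sum_map_ite_one_zero
    (fun k : Int => decide (2 ≤ nums.count k)) (PySem.Set.ofList nums)
  simp only [decide_eq_true_eq] at this
  rw [← this]
  refine congrArg List.sum (List.map_congr_left fun k _ => ?_)
  simp [Function.comp]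

-- ===== VERDICT (by name: the statement is the Claim_ definition above) =====
theorem num_duplicates_spec : Claim_equal_num_duplicates := by
  intro nums _
  unfold Spec_num_duplicates
  obtain ⟨h1, h2, h3⟩ := loopA_spec nums 0 PySem.Set.empty PySem.Set.empty List.nodup_nil
  rw [altB_eq_countP, num_duplicates, h1]
  have hmem : ∀ x, x ∈ (nums.foldl num_duplicates_step
      ((0 : Int), PySem.Set.empty, PySem.Set.empty)).2.2 ↔ 2 ≤ nums.count x := by
    intro x
    rw [h2 x]
    simp [PySem.Set.empty]
  have hfil : ((PySem.Set.ofList nums).filter (fun k => decide (2 ≤ nums.count k))).Nodup :=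
    (PySem.Set.nodup_ofList nums).filter _
  have hperm : (nums.foldl num_duplicates_step
      ((0 : Int), PySem.Set.empty, PySem.Set.empty)).2.2.Perm
      ((PySem.Set.ofList nums).filter (fun k => decide (2 ≤ nums.count k))) := by
    rw [List.perm_ext_iff_of_nodup h3 hfil]
    intro a
    rw [hmem a]
    simp only [List.mem_filter, PySem.Set.mem_ofList, decide_eq_true_eq]
    constructor
    · intro h
      exact ⟨List.count_pos_iff.mp (by omega), h⟩
    · exact fun h => h.2
  rw [List.countP_eq_length_filter, ← hperm.length_eq]
  simp
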